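-- pv_equiv track=rewrite | github.com/lemurey/advent_of_code | 2019/day19.py | zero_row
-- ===== SOURCE A (Python) =====
-- def zero_row(row, min_s):
--     out = ''
--     s = 0
--     for i, val in enumerate(reversed(row)):
--         if val == '#' and i >= min_s:
--             s += 1
--         if s <= 100 and i >= min_s and val == '#':
--             out += 'O'
--         else:
--             out += val
--     return ''.join(reversed(out))
-- ===== SOURCE B (Python) =====
-- def zero_row(row, min_s):
--     cutoff = len(row) - 1 - min_s
--     hashes = [i for i, c in enumerate(row) if c == '#' and i <= cutoff]
--     to_mark = set(hashes[-100:])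
--     return ''.join('O' if i in to_mark else c for i, c in enumerate(row))
-- ===== Notes on version B (the rewrite author's own statement) =====
-- stated objective: simpler
-- what changed: Replaces the counting loop over reversed(row) plus a final string reversal with a forward pass that collects qualifying '#' indices, a tail slice taking the rightmost 100, and a rebuild pass marking that set.
import Mathlib
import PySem

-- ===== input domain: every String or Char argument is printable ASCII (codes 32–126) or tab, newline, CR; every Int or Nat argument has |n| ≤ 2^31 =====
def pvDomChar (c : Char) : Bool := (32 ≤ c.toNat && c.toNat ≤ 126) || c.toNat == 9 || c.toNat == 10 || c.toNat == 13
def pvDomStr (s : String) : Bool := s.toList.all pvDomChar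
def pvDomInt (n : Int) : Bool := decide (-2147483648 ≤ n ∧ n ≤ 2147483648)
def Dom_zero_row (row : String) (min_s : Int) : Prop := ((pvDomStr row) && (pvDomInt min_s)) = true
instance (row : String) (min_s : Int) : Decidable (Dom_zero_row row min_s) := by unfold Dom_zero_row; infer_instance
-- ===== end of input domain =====

-- B replaces A's counting loop over reversed(row) (plus a final reversal) with a forward
-- index-collection pass, a tail slice keeping the rightmost 100 qualifying '#', and a rebuild pass (objective: simpler).

-- ===== PORT A =====
def zero_row (row : String) (min_s : Int) : String :=
  let r := (PySem.List.enumerate row.toList.reverse 0).foldl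
    (fun (acc : List Char × Int) (p : Int × Char) =>
      let s := if p.2 = '#' ∧ p.1 ≥ min_s then acc.2 + 1 else acc.2
      let out := if s ≤ 100 ∧ p.1 ≥ min_s ∧ p.2 = '#' then acc.1 ++ ['O'] else acc.1 ++ [p.2]
      (out, s)) ([], 0)
  String.ofList r.1.reverse

-- ===== PORT B =====
def zero_row_alt (row : String) (min_s : Int) : String :=
  let cutoff : Int := (row.toList.length : Int) - 1 - min_s
  let hashes := ((PySem.List.enumerate row.toList 0).filter
      (fun p => decide (p.2 = '#' ∧ p.1 ≤ cutoff))).map Prod.fst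
  let to_mark : PySem.Set Int := PySem.Set.ofList (PySem.List.slice hashes (some (-100)) none)
  String.ofList ((PySem.List.enumerate row.toList 0).map
      (fun p => if PySem.Set.contains to_mark p.1 then 'O' else p.2))

-- ===== PRECONDITION & SPEC =====
def Spec_zero_row (row : String) (min_s : Int) (out : String) : Prop := out = zero_row_alt row min_s
instance (row : String) (min_s : Int) (out : String) : Decidable (Spec_zero_row row min_s out) := by unfold Spec_zero_row; infer_instance

-- ===== CLAIM (what is proved, stated in full; the proofs are below) =====
def Claim_equal_zero_row : Prop := ∀ (row : String) (min_s : Int), Dom_zero_row row min_s → Spec_zero_row row min_s (zero_row row min_s)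

-- ===== LEMMAS AND PROOFS =====

def goA (min_s : Int) : List (Int × Char) → Int → List Char
  | [], _ => []
  | p :: t, s =>
    let s' := if p.2 = '#' ∧ p.1 ≥ min_s then s + 1 else s
    (if s' ≤ 100 ∧ p.1 ≥ min_s ∧ p.2 = '#' then 'O' else p.2) :: goA min_s t s'

theorem foldA_eq (min_s : Int) (ps : List (Int × Char)) (out : List Char) (s : Int) :
    (ps.foldl (fun (acc : List Char × Int) (p : Int × Char) =>
      let s := if p.2 = '#' ∧ p.1 ≥ min_s then acc.2 + 1 else acc.2
      let out := if s ≤ 100 ∧ p.1 ≥ min_s ∧ p.2 = '#' then acc.1 ++ ['O'] else acc.1 ++ [p.2]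
      (out, s)) (out, s)).1 = out ++ goA min_s ps s := by
  induction ps generalizing out s with
  | nil => simp [goA]
  | cons p t ih =>
    simp only [List.foldl_cons, goA]
    by_cases h : p.2 = '#' ∧ p.1 ≥ min_s
    · by_cases h2 : s + 1 ≤ 100 ∧ p.1 ≥ min_s ∧ p.2 = '#' <;>
        (simp [h, h2, ih, List.append_assoc]; try (split_ifs <;> simp))
    · by_cases h2 : s ≤ 100 ∧ p.1 ≥ min_s ∧ p.2 = '#' <;>
        (simp [h, h2, ih, List.append_assoc]; try (split_ifs <;> simp))

theorem goA_eq_mark (min_s : Int) (ps : List (Int × Char)) (s0 : Int)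
    (hnd : (ps.map Prod.fst).Nodup) :
    goA min_s ps s0 = ps.map (fun p =>
      if (p.2 = '#' ∧ p.1 ≥ min_s) ∧
         p.1 ∈ (((ps.filter (fun q => decide (q.2 = '#' ∧ q.1 ≥ min_s))).map Prod.fst).take
                  (100 - s0).toNat)
      then 'O' else p.2) := by
  induction ps generalizing s0 with
  | nil => simp [goA]
  | cons p t ih =>
    simp only [List.map_cons, List.nodup_cons] at hnd
    obtain ⟨hp, hnd'⟩ := hnd
    by_cases hq : p.2 = '#' ∧ p.1 ≥ min_s
    · have hfil : (p :: t).filter (fun q => decide (q.2 = '#' ∧ q.1 ≥ min_s))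
          = p :: t.filter (fun q => decide (q.2 = '#' ∧ q.1 ≥ min_s)) := by
        simp [hq]
      by_cases hk : s0 + 1 ≤ 100
      · have htake : ((100 : Int) - s0).toNat = ((100 : Int) - (s0+1)).toNat + 1 := by omega
        simp only [goA, hq, hfil, List.map_cons, htake, List.take_succ_cons, and_self, if_true]
        congr 1
        · simp [hk]
        · rw [ih (s0+1) hnd']
          apply List.map_congr_left
          intro q hqmem
          have hne : q.1 ≠ p.1 := by
            intro he; exact hp (he ▸ List.mem_map_of_mem hqmem (f := Prod.fst))
          simp [hne]
      · have htake : ((100 : Int) - s0).toNat = 0 := by omega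
        have htake' : ((100 : Int) - (s0+1)).toNat = 0 := by omega
        simp only [goA, hq, hfil, List.map_cons, htake, List.take_zero, and_self, if_true]
        congr 1
        · simp [hk]
        · rw [ih (s0+1) hnd']
          simp [htake']
    · have hfil : (p :: t).filter (fun q => decide (q.2 = '#' ∧ q.1 ≥ min_s))
          = t.filter (fun q => decide (q.2 = '#' ∧ q.1 ≥ min_s)) := by
        simp [hq]
      simp only [goA, hq, hfil, List.map_cons, if_false]
      congr 1
      · have hns : ¬ (s0 ≤ 100 ∧ p.1 ≥ min_s ∧ p.2 = '#') := by tauto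
        simp [hns]
      · exact ih s0 hnd'

theorem enumerate_reverse (l : List Char) :
    PySem.List.enumerate l.reverse 0 =
      (PySem.List.enumerate l 0).reverse.map (fun p => ((l.length : Int) - 1 - p.1, p.2)) := by
  apply List.ext_getElem
  · simp [PySem.List.length_enumerate]
  · intro i h1 h2
    have hi : i < l.length := by simpa [PySem.List.length_enumerate] using h1
    simp only [PySem.List.getElem_enumerate, List.getElem_reverse, List.getElem_map,
      PySem.List.length_enumerate]
    refine Prod.ext ?_ rfl
    show ((0:Int) + (i:Int)) = (l.length : Int) - 1 - (0 + ((l.length - 1 - i : Nat) : Int))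
    omega

theorem zero_row_eq (row : String) (min_s : Int) :
    zero_row row min_s = zero_row_alt row min_s := by
  have hnd : ((PySem.List.enumerate row.toList.reverse 0).map Prod.fst).Nodup :=
    List.pairwise_map.mpr ((PySem.List.pairwise_lt_enumerate _ 0).imp (fun h => ne_of_lt h))
  have hA : zero_row row min_s
      = String.ofList ((goA min_s (PySem.List.enumerate row.toList.reverse 0) 0).reverse) := by
    simp only [zero_row]
    rw [foldA_eq, List.nil_append]
  rw [hA, goA_eq_mark min_s _ 0 hnd]
  simp only [zero_row_alt]
  congr 1
  rw [enumerate_reverse]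
  simp only [List.filter_map, List.map_map, List.filter_reverse, List.map_reverse,
    List.reverse_reverse]
  apply List.map_congr_left
  intro p hp
  have hfc : List.filter
        ((fun q => decide (q.2 = '#' ∧ q.1 ≥ min_s)) ∘ fun p => ((row.toList.length : Int) - 1 - p.1, p.2))
        (PySem.List.enumerate row.toList 0)
      = List.filter (fun p => decide (p.2 = '#' ∧ p.1 ≤ (row.toList.length : Int) - 1 - min_s))
        (PySem.List.enumerate row.toList 0) := by
    apply List.filter_congr
    intro q _
    simp only [Function.comp_apply]
    exact decide_eq_decide.mpr (and_congr_right (fun _ => by omega))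
  rw [hfc]
  have h100 : ((100 : Int) - 0).toNat = 100 := rfl
  rw [h100, List.take_reverse, List.length_map, ← List.map_drop]
  refine if_congr ?_ rfl rfl
  rw [PySem.Set.contains_iff, PySem.Set.mem_ofList,
    PySem.List.slice_from_neg_ofNat _ 100 (by norm_num), List.length_map, ← List.map_drop]
  obtain ⟨k, hk, rfl⟩ := (PySem.List.mem_enumerate_iff _ _ p).mp hp
  simp only [List.mem_reverse, List.mem_map, Function.comp_apply]
  constructor
  · rintro ⟨⟨hc, hms⟩, q, hqd, hq1⟩
    exact ⟨q, hqd, by omega⟩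
  · rintro ⟨q, hqd, hq1⟩
    have hqHP := List.mem_of_mem_drop hqd
    have hcond := List.of_mem_filter hqHP
    have hqE : q ∈ PySem.List.enumerate row.toList 0 := List.mem_of_mem_filter hqHP
    obtain ⟨k2, hk2, hq⟩ := (PySem.List.mem_enumerate_iff _ _ q).mp hqE
    have hk2k : k2 = k := by
      subst hq; simp only at hq1; omega
    subst hk2k; subst hq
    simp only [decide_eq_true_eq] at hcond
    exact ⟨⟨hcond.1, by omega⟩, ⟨_, hqd, rfl⟩⟩

-- ===== VERDICT (by name: the statement is the Claim_ definition above) =====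
theorem zero_row_spec : Claim_equal_zero_row := by
  intro row min_s _
  exact zero_row_eq row min_s
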